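-- pv_equiv track=rewrite | github.com/venthur/aoc | 2015/22/main.py | apply_effects
-- ===== SOURCE A (Python) =====
-- from copy import deepcopy
--
-- def apply_effects(human, boss, effects):
--     human = human.copy()
--     boss = boss.copy()
--     effects = deepcopy(effects)
--
--     # reset armor on each effect round, increasing it only if we have a valid
--     # one again
--     human['armor'] = 0
--     for spell in effects:
--         human['hp'] += spell['heal']
--         human['mana'] += spell['mana']
--         boss['hp'] -= spell['damage']
--         human['armor'] += spell['armor']
--         spell['duration'] -= 1
--
--     effects = [e for e in effects if e['duration'] > 0]
--     return human, boss, effects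
-- ===== SOURCE B (Python) =====
-- def apply_effects(human, boss, effects):
--     # aggregate every (field, value) contribution of every active effect into one totals dict
--     totals = {}
--     for e in effects:
--         for k, v in e.items():
--             totals[k] = totals.get(k, 0) + v
--     human = {**human, 'armor': 0}
--     boss = boss.copy()
--     # dispatch each aggregated field once to its target stat
--     for k, v in totals.items():
--         if k == 'heal':
--             human['hp'] += v
--         elif k == 'mana':
--             human['mana'] += v
--         elif k == 'damage':
--             boss['hp'] -= v
--         elif k == 'armor':
--             human['armor'] += v
--     effects = [{**e, 'duration': e['duration'] - 1} for e in effects if e['duration'] > 1]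
--     return human, boss, effects
-- ===== Notes on version B (the rewrite author's own statement) =====
-- stated objective: alternative
-- what changed: Instead of A's single per-spell loop that threads human/boss/spell state, B first flattens all effects into one aggregated totals dict (one generic accumulation over every (field,value) item), then dispatches each aggregated field exactly once to its target stat, and rebuilds the surviving effects non-mutatingly with fresh decremented dicts.
import Mathlib
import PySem

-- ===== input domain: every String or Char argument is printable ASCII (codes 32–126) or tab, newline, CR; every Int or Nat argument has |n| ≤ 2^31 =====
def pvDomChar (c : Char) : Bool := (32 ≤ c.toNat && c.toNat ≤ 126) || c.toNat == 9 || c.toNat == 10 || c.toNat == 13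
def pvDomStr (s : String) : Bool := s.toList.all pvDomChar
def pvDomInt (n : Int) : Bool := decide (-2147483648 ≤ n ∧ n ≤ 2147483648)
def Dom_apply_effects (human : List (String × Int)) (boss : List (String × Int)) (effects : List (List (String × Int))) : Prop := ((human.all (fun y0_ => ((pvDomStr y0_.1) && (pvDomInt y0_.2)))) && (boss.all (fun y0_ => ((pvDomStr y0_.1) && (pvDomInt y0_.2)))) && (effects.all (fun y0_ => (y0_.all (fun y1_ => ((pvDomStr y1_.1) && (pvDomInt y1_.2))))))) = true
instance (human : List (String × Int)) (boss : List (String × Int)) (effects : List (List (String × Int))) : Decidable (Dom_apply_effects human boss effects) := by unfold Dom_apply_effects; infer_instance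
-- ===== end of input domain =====

-- B aggregates all effects into one totals dict first and then dispatches each aggregated field
-- once to its target stat, rebuilding the surviving effects without mutation (objective:
-- alternative decomposition). Return-value equivalence only: the Python A deep-copies its inputs,
-- so neither program mutates caller data.


-- ===== PORT A =====
-- the body of A's 'for spell in effects' loop (state: human, boss, already-processed spells)
def applyEffectsStepA (st : PySem.Dict String Int × PySem.Dict String Int × List (PySem.Dict String Int))
    (e : List (String × Int)) :
    PySem.Dict String Int × PySem.Dict String Int × List (PySem.Dict String Int) :=
  let sp : PySem.Dict String Int := PySem.Dict.mk e
  let h := st.1.modify "hp" 0 (· + sp.getD "heal" 0)        -- human['hp'] += spell['heal']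
  let h := h.modify "mana" 0 (· + sp.getD "mana" 0)         -- human['mana'] += spell['mana']
  let b := st.2.1.modify "hp" 0 (· - sp.getD "damage" 0)    -- boss['hp'] -= spell['damage']
  let h := h.modify "armor" 0 (· + sp.getD "armor" 0)       -- human['armor'] += spell['armor']
  let sp := sp.modify "duration" 0 (· - 1)                  -- spell['duration'] -= 1
  (h, b, st.2.2 ++ [sp])

def apply_effects (human : List (String × Int)) (boss : List (String × Int)) (effects : List (List (String × Int))) : (List (String × Int)) × (List (String × Int)) × (List (List (String × Int))) :=
  let h0 : PySem.Dict String Int := (PySem.Dict.mk human).insert "armor" 0   -- human['armor'] = 0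
  let st := effects.foldl applyEffectsStepA (h0, PySem.Dict.mk boss, [])
  let effs := st.2.2.filter (fun e => e.getD "duration" 0 > 0)               -- [e for e in effects if e['duration'] > 0]
  (st.1.items, st.2.1.items, effs.map (·.items))

-- ===== PORT B =====
-- the body of B's dispatch loop 'for k, v in totals.items(): …' (state: human, boss)
def applyTotalsStep (st : PySem.Dict String Int × PySem.Dict String Int) (kv : String × Int) :
    PySem.Dict String Int × PySem.Dict String Int :=
  if kv.1 == "heal" then (st.1.modify "hp" 0 (· + kv.2), st.2)          -- human['hp'] += v
  else if kv.1 == "mana" then (st.1.modify "mana" 0 (· + kv.2), st.2)   -- human['mana'] += v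
  else if kv.1 == "damage" then (st.1, st.2.modify "hp" 0 (· - kv.2))   -- boss['hp'] -= v
  else if kv.1 == "armor" then (st.1.modify "armor" 0 (· + kv.2), st.2) -- human['armor'] += v
  else st

def apply_effects_alt (human : List (String × Int)) (boss : List (String × Int)) (effects : List (List (String × Int))) : (List (String × Int)) × (List (String × Int)) × (List (List (String × Int))) :=
  -- totals[k] = totals.get(k, 0) + v, over every item of every effect
  let totals : PySem.Dict String Int :=
    effects.foldl (fun t e => e.foldl (fun t kv => t.modify kv.1 0 (· + kv.2)) t) PySem.Dict.empty
  let h : PySem.Dict String Int := (PySem.Dict.mk human).insert "armor" 0   -- {**human, 'armor': 0}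
  let st := totals.items.foldl applyTotalsStep (h, PySem.Dict.mk boss)
  let effs := (effects.filter (fun e => (PySem.Dict.mk e).getD "duration" 0 > 1)).map
      (fun e => (PySem.Dict.mk e).insert "duration" ((PySem.Dict.mk e).getD "duration" 0 - 1))  -- {**e, 'duration': e['duration'] - 1}
  (st.1.items, st.2.items, effs.map (·.items))

-- ===== PRECONDITION & SPEC =====
-- Pre_ excludes association lists with duplicate keys (no Python dict can denote them) and, when
-- effects is non-empty, inputs lacking a key A's loop reads — on those A raises KeyError.
def Pre_apply_effects (human : List (String × Int)) (boss : List (String × Int)) (effects : List (List (String × Int))) : Prop :=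
  (human.map Prod.fst).Nodup ∧ (boss.map Prod.fst).Nodup ∧ (∀ e ∈ effects, (e.map Prod.fst).Nodup) ∧
  (effects ≠ [] →
    "hp" ∈ human.map Prod.fst ∧ "mana" ∈ human.map Prod.fst ∧ "hp" ∈ boss.map Prod.fst ∧
    ∀ e ∈ effects, "heal" ∈ e.map Prod.fst ∧ "mana" ∈ e.map Prod.fst ∧ "damage" ∈ e.map Prod.fst ∧
      "armor" ∈ e.map Prod.fst ∧ "duration" ∈ e.map Prod.fst)
instance (human : List (String × Int)) (boss : List (String × Int)) (effects : List (List (String × Int))) : Decidable (Pre_apply_effects human boss effects) := by unfold Pre_apply_effects; infer_instance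

def pvWitness_apply_effects : (List (String × Int)) × (List (String × Int)) × (List (List (String × Int))) :=
  ([("hp", 10), ("mana", 250)], [("hp", 13)],
   [[("heal", 0), ("mana", 101), ("damage", 3), ("armor", 0), ("duration", 2)],
    [("heal", 2), ("mana", 0), ("damage", 0), ("armor", 7), ("duration", 1)]])

def Spec_apply_effects (human : List (String × Int)) (boss : List (String × Int)) (effects : List (List (String × Int))) (out : (List (String × Int)) × (List (String × Int)) × (List (List (String × Int)))) : Prop := out = apply_effects_alt human boss effects
instance (human : List (String × Int)) (boss : List (String × Int)) (effects : List (List (String × Int))) (out : (List (String × Int)) × (List (String × Int)) × (List (List (String × Int)))) : Decidable (Spec_apply_effects human boss effects out) := by unfold Spec_apply_effects; infer_instance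

-- ===== CLAIM (what is proved, stated in full; the proofs are below) =====
def Claim_equal_apply_effects : Prop := ∀ (human : List (String × Int)) (boss : List (String × Int)) (effects : List (List (String × Int))), Dom_apply_effects human boss effects → Pre_apply_effects human boss effects → Spec_apply_effects human boss effects (apply_effects human boss effects)

-- ===== LEMMAS AND PROOFS =====

-- the sum of the values attached to key k in a raw (key, value) list
def sumAt (k : String) (L : List (String × Int)) : Int :=
  ((L.filter (fun p => p.1 == k)).map Prod.snd).sum

theorem sumAt_nil (k : String) : sumAt k [] = 0 := rfl

theorem sumAt_cons (k : String) (p : String × Int) (L : List (String × Int)) :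
    sumAt k (p :: L) = (if p.1 = k then p.2 else 0) + sumAt k L := by
  by_cases h : p.1 = k <;> simp [sumAt, h]

-- two inserts at distinct keys commute when the key inserted second is already present
theorem dict_insert_comm {κ ν : Type} [BEq κ] [LawfulBEq κ] (d : PySem.Dict κ ν) (k k' : κ)
    (v v' : ν) (hne : k ≠ k') (hk : d.contains k = true) :
    (d.insert k' v').insert k v = (d.insert k v).insert k' v' := by
  apply PySem.Dict.ext
  by_cases hk' : d.contains k' = true
  · have h1 : (d.insert k' v').contains k = true := by
      simp [PySem.Dict.contains_insert, hk]
    have h2 : (d.insert k v).contains k' = true := by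
      simp [PySem.Dict.contains_insert, hk']
    rw [PySem.Dict.items_insert_of_contains _ _ h1, PySem.Dict.items_insert_of_contains _ _ hk',
      PySem.Dict.items_insert_of_contains _ _ h2, PySem.Dict.items_insert_of_contains _ _ hk,
      List.map_map, List.map_map]
    apply List.map_congr_left
    intro p _
    by_cases hp : p.1 = k <;> by_cases hp' : p.1 = k' <;>
      simp_all [Function.comp, beq_iff_eq, Ne.symm hne]
  · have hk'f : d.contains k' = false := by simpa using hk'
    have h1 : (d.insert k' v').contains k = true := by
      simp [PySem.Dict.contains_insert, hk]
    have h2 : (d.insert k v).contains k' = false := by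
      simp [PySem.Dict.contains_insert, hk'f, Ne.symm hne]
    rw [PySem.Dict.items_insert_of_contains _ _ h1,
      PySem.Dict.items_insert_of_not_contains _ _ hk'f,
      PySem.Dict.items_insert_of_not_contains _ _ h2,
      PySem.Dict.items_insert_of_contains _ _ hk,
      List.map_append]
    simp [Ne.symm hne]

-- modify at a key already present in d commutes past a modify at another key
theorem dict_modify_comm {κ ν : Type} [BEq κ] [LawfulBEq κ] (d : PySem.Dict κ ν) (k k' : κ)
    (c c' : ν) (f g : ν → ν) (hne : k ≠ k') (hk : d.contains k = true) :
    (d.modify k' c' g).modify k c f = (d.modify k c f).modify k' c' g := by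
  simp only [PySem.Dict.modify]
  rw [PySem.Dict.getD_insert_of_ne _ _ _ hne, PySem.Dict.getD_insert_of_ne _ _ _ (Ne.symm hne),
    dict_insert_comm _ _ _ _ _ hne hk]

-- two modifies at the same key fuse into one
theorem dict_modify_modify_self {κ ν : Type} [BEq κ] [LawfulBEq κ] (d : PySem.Dict κ ν) (k : κ)
    (c : ν) (f g : ν → ν) : (d.modify k c f).modify k c g = d.modify k c (fun x => g (f x)) := by
  simp [PySem.Dict.modify, PySem.Dict.getD_insert_self, PySem.Dict.insert_insert_self]

-- re-inserting the looked-up value at a present key of a duplicate-free dict changes nothing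
theorem dict_insert_getD_self (d : PySem.Dict String Int) (k : String)
    (hnd : d.keys.Nodup) (hk : d.contains k = true) : d.insert k (d.getD k 0) = d := by
  apply PySem.Dict.ext
  rw [PySem.Dict.items_insert_of_contains _ _ hk]
  conv_rhs => rw [← List.map_id d.items]
  apply List.map_congr_left
  intro p hp
  obtain ⟨a, v⟩ := p
  by_cases h : a = k
  · subst h
    have hv : d.getD a 0 = v := PySem.Dict.getD_of_mem_items d hp hnd 0
    simp [hv]
  · simp [h]

-- a modify at another key on the seed moves out of a per-key modify loop (k present throughout)
theorem foldl_modify_swap (E : List (List (String × Int))) (d : PySem.Dict String Int)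
    (k k' : String) (F : List (String × Int) → Int → Int) (g : Int → Int)
    (hne : k ≠ k') (hk : d.contains k = true) :
    E.foldl (fun h e => h.modify k 0 (F e)) (d.modify k' 0 g) =
      (E.foldl (fun h e => h.modify k 0 (F e)) d).modify k' 0 g := by
  induction E generalizing d with
  | nil => rfl
  | cons e E ih =>
    simp only [List.foldl_cons]
    rw [dict_modify_comm d k k' 0 0 (F e) g hne hk,
      ih _ (by simp [PySem.Dict.contains_modify, hk])]

-- modify preserves duplicate-freeness of the keys
theorem dict_modify_nodup (d : PySem.Dict String Int) (k : String) (c : Int) (f : Int → Int)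
    (h : d.keys.Nodup) : (d.modify k c f).keys.Nodup :=
  PySem.Dict.nodup_keys_insert d k _ h

-- an additive modify loop started on a freshly modified seed accumulates into one modify
theorem foldl_modify_add_acc (E : List (List (String × Int))) (d : PySem.Dict String Int)
    (k : String) (a : Int) (F : List (String × Int) → Int) :
    E.foldl (fun h e => h.modify k 0 (· + F e)) (d.modify k 0 (· + a)) =
      d.modify k 0 (· + (a + (E.map F).sum)) := by
  induction E generalizing a with
  | nil =>
    simp only [List.foldl_nil, List.map_nil, List.sum_nil, Int.add_zero]
  | cons e E ih =>
    simp only [List.foldl_cons, List.map_cons, List.sum_cons, dict_modify_modify_self]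
    rw [show (fun x : Int => x + a + F e) = (fun x : Int => x + (a + F e)) from by
      funext x; ring, ih]
    congr 1
    funext x
    ring

-- an additive per-element modify loop is a single modify by the total (target key present)
theorem foldl_modify_add_sum (E : List (List (String × Int))) (d : PySem.Dict String Int)
    (k : String) (F : List (String × Int) → Int)
    (hnd : d.keys.Nodup) (hk : d.contains k = true) :
    E.foldl (fun h e => h.modify k 0 (· + F e)) d = d.modify k 0 (· + (E.map F).sum) := by
  have : d.modify k 0 (· + 0) = d := by
    show d.insert k (d.getD k 0 + 0) = d
    rw [Int.add_zero]
    exact dict_insert_getD_self d k hnd hk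
  calc E.foldl (fun h e => h.modify k 0 (· + F e)) d
      = E.foldl (fun h e => h.modify k 0 (· + F e)) (d.modify k 0 (· + 0)) := by rw [this]
    _ = d.modify k 0 (· + (0 + (E.map F).sum)) := foldl_modify_add_acc E d k 0 F
    _ = d.modify k 0 (· + (E.map F).sum) := by rw [Int.zero_add]

-- the subtractive twin
theorem foldl_modify_sub_acc (E : List (List (String × Int))) (d : PySem.Dict String Int)
    (k : String) (a : Int) (F : List (String × Int) → Int) :
    E.foldl (fun h e => h.modify k 0 (· - F e)) (d.modify k 0 (· - a)) =
      d.modify k 0 (· - (a + (E.map F).sum)) := by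
  induction E generalizing a with
  | nil =>
    simp only [List.foldl_nil, List.map_nil, List.sum_nil, Int.add_zero]
  | cons e E ih =>
    simp only [List.foldl_cons, List.map_cons, List.sum_cons, dict_modify_modify_self]
    rw [show (fun x : Int => x - a - F e) = (fun x : Int => x - (a + F e)) from by
      funext x; ring, ih]
    congr 1
    funext x
    ring

theorem foldl_modify_sub_sum (E : List (List (String × Int))) (d : PySem.Dict String Int)
    (k : String) (F : List (String × Int) → Int)
    (hnd : d.keys.Nodup) (hk : d.contains k = true) :
    E.foldl (fun h e => h.modify k 0 (· - F e)) d = d.modify k 0 (· - (E.map F).sum) := by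
  have : d.modify k 0 (· - 0) = d := by
    show d.insert k (d.getD k 0 - 0) = d
    rw [Int.sub_zero]
    exact dict_insert_getD_self d k hnd hk
  calc E.foldl (fun h e => h.modify k 0 (· - F e)) d
      = E.foldl (fun h e => h.modify k 0 (· - F e)) (d.modify k 0 (· - 0)) := by rw [this]
    _ = d.modify k 0 (· - (0 + (E.map F).sum)) := foldl_modify_sub_acc E d k 0 F
    _ = d.modify k 0 (· - (E.map F).sum) := by rw [Int.zero_add]

-- A's combined loop, split into per-field loops (plus the decremented spells, appended)
theorem foldA_spec (E : List (List (String × Int))) (h b : PySem.Dict String Int)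
    (acc : List (PySem.Dict String Int))
    (hhp : h.contains "hp" = true) (hmana : h.contains "mana" = true) :
    E.foldl applyEffectsStepA (h, b, acc) =
      ((E.foldl (fun h e => h.modify "armor" 0 (· + (PySem.Dict.mk e).getD "armor" 0))
        (E.foldl (fun h e => h.modify "mana" 0 (· + (PySem.Dict.mk e).getD "mana" 0))
          (E.foldl (fun h e => h.modify "hp" 0 (· + (PySem.Dict.mk e).getD "heal" 0)) h))),
       E.foldl (fun b e => b.modify "hp" 0 (· - (PySem.Dict.mk e).getD "damage" 0)) b,
       acc ++ E.map (fun e => (PySem.Dict.mk e).modify "duration" 0 (· - 1))) := by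
  induction E generalizing h b acc with
  | nil => simp
  | cons e E ih =>
    simp only [List.foldl_cons, applyEffectsStepA, List.map_cons]
    rw [ih _ _ _ (by simp [PySem.Dict.contains_modify, hhp])
      (by simp [PySem.Dict.contains_modify, hmana])]
    refine congrArg₂ Prod.mk ?_ (congrArg₂ Prod.mk rfl ?_)
    · rw [foldl_modify_swap E _ "hp" "armor" _ _ (by decide)
          (by simp [PySem.Dict.contains_modify, hhp]),
        foldl_modify_swap E _ "hp" "mana" _ _ (by decide)
          (by simp [PySem.Dict.contains_modify, hhp]),
        foldl_modify_swap E _ "mana" "armor" _ _ (by decide)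
          (by simp [PySem.Dict.contains_modify])]
    · simp

-- one item-accumulation step of B's totals loop, read back through getD
theorem inner_totals_getD (e : List (String × Int)) (t : PySem.Dict String Int) (k : String) :
    (e.foldl (fun t kv => t.modify kv.1 0 (· + kv.2)) t).getD k 0 = t.getD k 0 + sumAt k e := by
  induction e generalizing t with
  | nil => simp [sumAt_nil]
  | cons p e ih =>
    rw [List.foldl_cons, ih, sumAt_cons, PySem.Dict.getD_modify]
    by_cases h : k = p.1
    · simp [h]
      ring
    · simp [h, show ¬ p.1 = k from fun hh => h hh.symm]

-- B's whole totals dict, read back through getD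
theorem totals_getD (E : List (List (String × Int))) (t : PySem.Dict String Int) (k : String) :
    (E.foldl (fun t e => e.foldl (fun t kv => t.modify kv.1 0 (· + kv.2)) t) t).getD k 0 =
      t.getD k 0 + (E.map (sumAt k)).sum := by
  induction E generalizing t with
  | nil => simp
  | cons e E ih =>
    rw [List.foldl_cons, ih, inner_totals_getD, List.map_cons, List.sum_cons]
    ring

-- the totals loop keeps keys duplicate-free
theorem totals_nodup_keys (E : List (List (String × Int))) (t : PySem.Dict String Int)
    (h : t.keys.Nodup) :
    (E.foldl (fun t e => e.foldl (fun t kv => t.modify kv.1 0 (· + kv.2)) t) t).keys.Nodup := by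
  induction E generalizing t with
  | nil => exact h
  | cons e E ih =>
    exact ih _ (PySem.Dict.nodup_keys_foldl_modify_key e Prod.fst 0 (fun _ kv => (· + kv.2)) t h)

-- on a duplicate-free pair list, sumAt is the dict lookup
theorem sumAt_eq_getD (L : List (String × Int)) (k : String) (h : (L.map Prod.fst).Nodup) :
    sumAt k L = (PySem.Dict.mk L).getD k 0 := by
  induction L with
  | nil =>
    rw [sumAt_nil, show (PySem.Dict.mk ([] : List (String × Int))) = PySem.Dict.empty from rfl,
      PySem.Dict.getD_empty]
  | cons p L ih =>
    rw [sumAt_cons, PySem.Dict.getD_eq_get?_getD, PySem.Dict.get?_mk_cons]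
    simp only [List.map_cons, List.nodup_cons] at h
    by_cases hk : p.1 = k
    · have hL : sumAt k L = 0 := by
        have : L.filter (fun p => p.1 == k) = [] := by
          apply List.filter_eq_nil_iff.mpr
          intro q hq hq'
          exact h.1 (by rw [hk, ← eq_of_beq hq']; exact List.mem_map_of_mem hq)
        simp [sumAt, this]
      simp [hk, hL]
    · rw [ih h.2, PySem.Dict.getD_eq_get?_getD]
      simp [hk]

-- B's dispatch loop over any pair list, given the four target keys are present
theorem foldB_spec (L : List (String × Int)) (h b : PySem.Dict String Int)
    (hnd : h.keys.Nodup) (bnd : b.keys.Nodup)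
    (hhp : h.contains "hp" = true) (hmana : h.contains "mana" = true)
    (harm : h.contains "armor" = true) (bhp : b.contains "hp" = true) :
    L.foldl applyTotalsStep (h, b) =
      (((h.modify "hp" 0 (· + sumAt "heal" L)).modify "mana" 0 (· + sumAt "mana" L)).modify
          "armor" 0 (· + sumAt "armor" L),
        b.modify "hp" 0 (· - sumAt "damage" L)) := by
  induction L generalizing h b with
  | nil =>
    simp only [List.foldl_nil, sumAt_nil]
    have idm : ∀ (d : PySem.Dict String Int) k, d.keys.Nodup → d.contains k = true →
        d.modify k 0 (· + 0) = d := by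
      intro d k hn hk
      show d.insert k (d.getD k 0 + 0) = d
      rw [Int.add_zero]
      exact dict_insert_getD_self d k hn hk
    have idm' : b.modify "hp" 0 (· - 0) = b := by
      show b.insert "hp" (b.getD "hp" 0 - 0) = b
      rw [Int.sub_zero]
      exact dict_insert_getD_self b "hp" bnd bhp
    rw [idm h "hp" hnd hhp, idm h "mana" hnd hmana, idm h "armor" hnd harm, idm']
  | cons p L ih =>
    have hc : ∀ k, (h.modify k 0 (· + p.2)).contains "hp" = true ∧
        (h.modify k 0 (· + p.2)).contains "mana" = true ∧
        (h.modify k 0 (· + p.2)).contains "armor" = true := by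
      intro k
      refine ⟨?_, ?_, ?_⟩ <;> simp [PySem.Dict.contains_modify, hhp, hmana, harm]
    have hn : ∀ k (f : Int → Int), (h.modify k 0 f).keys.Nodup := by
      intro k f
      show (h.insert k _).keys.Nodup
      exact PySem.Dict.nodup_keys_insert h _ _ hnd
    have bn : ∀ (f : Int → Int), (b.modify "hp" 0 f).keys.Nodup := by
      intro f
      exact PySem.Dict.nodup_keys_insert b _ _ bnd
    rw [List.foldl_cons]
    by_cases h1 : p.1 = "heal"
    · rw [show applyTotalsStep (h, b) p = (h.modify "hp" 0 (· + p.2), b) by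
        simp [applyTotalsStep, h1]]
      rw [ih _ _ (hn _ _) bnd (hc "hp").1 (hc "hp").2.1 (hc "hp").2.2 bhp,
        dict_modify_modify_self]
      simp only [sumAt_cons, h1, String.reduceEq, reduceIte, Int.zero_add]
      rw [show (fun x : Int => x + p.2 + sumAt "heal" L) =
        (fun x : Int => x + (p.2 + sumAt "heal" L)) from by funext x; ring]
    · by_cases h2 : p.1 = "mana"
      · rw [show applyTotalsStep (h, b) p = (h.modify "mana" 0 (· + p.2), b) by
          simp [applyTotalsStep, h2]]
        rw [ih _ _ (hn _ _) bnd (hc "mana").1 (hc "mana").2.1 (hc "mana").2.2 bhp,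
          dict_modify_comm h "hp" "mana" 0 0 _ _ (by decide) hhp,
          dict_modify_modify_self]
        simp only [sumAt_cons, h2, String.reduceEq, reduceIte, Int.zero_add]
        rw [show (fun x : Int => x + p.2 + sumAt "mana" L) =
          (fun x : Int => x + (p.2 + sumAt "mana" L)) from by funext x; ring]
      · by_cases h3 : p.1 = "damage"
        · rw [show applyTotalsStep (h, b) p = (h, b.modify "hp" 0 (· - p.2)) by
            simp [applyTotalsStep, h3]]
          rw [ih _ _ hnd (bn _) hhp hmana harm
            (by simp [PySem.Dict.contains_modify, bhp]), dict_modify_modify_self]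
          simp only [sumAt_cons, h3, String.reduceEq, reduceIte, Int.zero_add]
          rw [show (fun x : Int => x - p.2 - sumAt "damage" L) =
            (fun x : Int => x - (p.2 + sumAt "damage" L)) from by funext x; ring]
        · by_cases h4 : p.1 = "armor"
          · rw [show applyTotalsStep (h, b) p = (h.modify "armor" 0 (· + p.2), b) by
              simp [applyTotalsStep, h4]]
            rw [ih _ _ (hn _ _) bnd (hc "armor").1 (hc "armor").2.1 (hc "armor").2.2 bhp,
              dict_modify_comm h "hp" "armor" 0 0 _ _ (by decide) hhp,
              dict_modify_comm (h.modify "hp" 0 _) "mana" "armor" 0 0 _ _ (by decide)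
                (by simp [PySem.Dict.contains_modify, hmana]),
              dict_modify_modify_self]
            simp only [sumAt_cons, h4, String.reduceEq, reduceIte, Int.zero_add]
            rw [show (fun x : Int => x + p.2 + sumAt "armor" L) =
              (fun x : Int => x + (p.2 + sumAt "armor" L)) from by funext x; ring]
          · rw [show applyTotalsStep (h, b) p = (h, b) by
              simp [applyTotalsStep, h1, h2, h3, h4]]
            rw [ih _ _ hnd bnd hhp hmana harm bhp]
            simp [sumAt_cons, h1, h2, h3, h4]

-- ===== VERDICT (by name: the statement is the Claim_ definition above) =====
theorem apply_effects_spec : Claim_equal_apply_effects := by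
  intro human boss effects _hdom hpre
  obtain ⟨hnd, hbnd, hend, hkeys⟩ := hpre
  unfold Spec_apply_effects apply_effects apply_effects_alt
  dsimp only
  rcases eq_or_ne effects [] with rfl | hne
  · simp [show (PySem.Dict.empty : PySem.Dict String Int).items = [] from rfl]
  · obtain ⟨hhp, hmana, hbhp, _heff⟩ := hkeys hne
    have hH : ∀ k : String, k ∈ human.map Prod.fst → (PySem.Dict.mk human).contains k = true := by
      intro k hk
      rw [PySem.Dict.contains_iff_mem_keys, PySem.Dict.keys_mk]; exact hk
    have h0nd : ((PySem.Dict.mk human).insert "armor" 0).keys.Nodup :=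
      PySem.Dict.nodup_keys_insert _ _ _ (by rw [PySem.Dict.keys_mk]; exact hnd)
    have h0hp : ((PySem.Dict.mk human).insert "armor" 0).contains "hp" = true := by
      simp [PySem.Dict.contains_insert, hH "hp" hhp]
    have h0mana : ((PySem.Dict.mk human).insert "armor" 0).contains "mana" = true := by
      simp [PySem.Dict.contains_insert, hH "mana" hmana]
    have hB : (PySem.Dict.mk boss).contains "hp" = true := by
      rw [PySem.Dict.contains_iff_mem_keys, PySem.Dict.keys_mk]; exact hbhp
    rw [foldA_spec effects _ _ [] h0hp h0mana,
      foldl_modify_add_sum effects _ "hp" _ h0nd h0hp,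
      foldl_modify_add_sum effects _ "mana" _ (dict_modify_nodup _ _ _ _ h0nd)
        (by simp [PySem.Dict.contains_modify, h0mana]),
      foldl_modify_add_sum effects _ "armor" _
        (dict_modify_nodup _ _ _ _ (dict_modify_nodup _ _ _ _ h0nd))
        (by simp [PySem.Dict.contains_modify, PySem.Dict.contains_insert]),
      foldl_modify_sub_sum effects _ "hp" _ (by rw [PySem.Dict.keys_mk]; exact hbnd) hB,
      foldB_spec _ _ _ h0nd (by rw [PySem.Dict.keys_mk]; exact hbnd) h0hp h0mana
        (by simp [PySem.Dict.contains_insert]) hB]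
    have hsum : ∀ k : String, sumAt k (effects.foldl
        (fun t e => e.foldl (fun t kv => t.modify kv.1 0 (· + kv.2)) t) PySem.Dict.empty).items =
        (effects.map (fun e => (PySem.Dict.mk e).getD k 0)).sum := by
      intro k
      rw [sumAt_eq_getD _ _ (totals_nodup_keys effects _ (by simp [PySem.Dict.keys_empty]))]
      show (effects.foldl _ PySem.Dict.empty).getD k 0 = _
      rw [totals_getD]
      rw [PySem.Dict.getD_empty, List.map_congr_left (fun e he => sumAt_eq_getD e k (hend e he))]
      ring
    refine congrArg₂ Prod.mk ?_ (congrArg₂ Prod.mk ?_ ?_)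
    · rw [hsum "heal", hsum "mana", hsum "armor"]
    · rw [hsum "damage"]
    · -- surviving effects
      rw [List.nil_append, List.filter_map, List.map_map]
      have hpred : ∀ e ∈ effects,
          ((fun d : PySem.Dict String Int => decide (d.getD "duration" 0 > 0)) ∘
            (fun e => (PySem.Dict.mk e).modify "duration" 0 (· - 1))) e =
          (fun e => decide ((PySem.Dict.mk e).getD "duration" 0 > 1)) e := by
        intro e _
        simp only [Function.comp, PySem.Dict.getD_modify_self, decide_eq_decide]
        omega
      rw [List.filter_congr hpred]
      simp [PySem.Dict.modify]
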